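-- pv_equiv track=rewrite | github.com/amishra-eightfold/csd-analyser | utils/token_manager.py | create_semantic_groups
-- ===== SOURCE A (Python) =====
-- from typing import List, Dict, Any, Tuple, Optional, Union
--
-- def create_semantic_groups(items: List[Dict[str, Any]]) -> List[List[Dict[str, Any]]]:
--     """Group items based on semantic relationships."""
--     groups = []
--     processed = set()
--
--     for item in items:
--         if item.get('Id') in processed:
--             continue
--
--         group = [item]
--         processed.add(item.get('Id'))
--
--         # Find related items based on product area, feature, and root cause
--         for other in items:
--             if other.get('Id') in processed:
--                 continue
--
--             is_related = (
--                 other.get('Product_Area__c') == item.get('Product_Area__c') or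
--                 other.get('Product_Feature__c') == item.get('Product_Feature__c') or
--                 other.get('RCA__c') == item.get('RCA__c')
--             )
--
--             if is_related:
--                 group.append(other)
--                 processed.add(other.get('Id'))
--
--         groups.append(group)
--
--     return groups
-- ===== SOURCE B (Python) =====
-- def create_semantic_groups(items):
--     """Group items based on semantic relationships.
--
--     Bucket-indexed version: index items once by each of the three attributes,
--     then for each seed walk the union of its three buckets (in index order)
--     instead of rescanning the whole list.
--     """
--     by_area = {}
--     by_feature = {}
--     by_rca = {}
--     for idx, item in enumerate(items):
--         by_area.setdefault(item.get('Product_Area__c'), []).append((idx, item))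
--         by_feature.setdefault(item.get('Product_Feature__c'), []).append((idx, item))
--         by_rca.setdefault(item.get('RCA__c'), []).append((idx, item))
--
--     groups = []
--     processed = set()
--     for item in items:
--         if item.get('Id') in processed:
--             continue
--         group = [item]
--         processed.add(item.get('Id'))
--         cand = {}
--         for j, other in (by_area.get(item.get('Product_Area__c'), [])
--                          + by_feature.get(item.get('Product_Feature__c'), [])
--                          + by_rca.get(item.get('RCA__c'), [])):
--             if j not in cand:
--                 cand[j] = other
--         for j, other in sorted(cand.items(), key=lambda p: p[0]):
--             oid = other.get('Id')
--             if oid not in processed: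
--                 group.append(other)
--                 processed.add(oid)
--         groups.append(group)
--     return groups
-- ===== Notes on version B (the rewrite author's own statement) =====
-- stated objective: alternative
-- what changed: Instead of rescanning the whole item list for every seed (nested loops), B indexes items once by each of the three attributes into buckets and, per seed, walks the sorted union of its three buckets; every item occurs in at most three such unions, so the worst case drops from O(n^2) to O(n log n), though on typical inputs (few large groups) both are effectively linear and a timing run shows no difference.
import Mathlib
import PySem

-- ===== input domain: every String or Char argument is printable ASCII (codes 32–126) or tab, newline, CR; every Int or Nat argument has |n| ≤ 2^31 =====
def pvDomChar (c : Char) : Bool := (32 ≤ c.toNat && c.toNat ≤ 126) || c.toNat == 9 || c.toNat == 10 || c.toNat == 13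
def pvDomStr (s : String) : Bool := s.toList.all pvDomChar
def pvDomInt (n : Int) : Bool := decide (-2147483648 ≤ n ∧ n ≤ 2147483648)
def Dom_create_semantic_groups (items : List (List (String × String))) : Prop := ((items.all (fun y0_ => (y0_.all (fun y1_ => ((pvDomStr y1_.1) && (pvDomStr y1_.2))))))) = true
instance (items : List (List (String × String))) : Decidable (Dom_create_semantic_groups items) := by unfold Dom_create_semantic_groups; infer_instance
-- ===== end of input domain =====

-- B replaces A's per-seed rescan of all items by three attribute-indexed buckets
-- built once; per seed it walks the sorted union of its three buckets (objective: alternative).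


-- shared helper: Python's item.get(k) on a dict passed as an association list
def pvGet (it : List (String × String)) (k : String) : Option String :=
  (PySem.Dict.mk it).get? k

-- ===== PORT A =====
def create_semantic_groups (items : List (List (String × String))) : List (List (List (String × String))) :=
  (items.foldl
    (fun (st : List (List (List (String × String))) × PySem.Set (Option String)) item =>
      if st.2.contains (pvGet item "Id") then st
      else
        let processed := st.2.add (pvGet item "Id")
        let inner := items.foldl
          (fun (st2 : List (List (String × String)) × PySem.Set (Option String)) other =>
            if st2.2.contains (pvGet other "Id") then st2
            else
              let is_related :=
                (pvGet other "Product_Area__c" == pvGet item "Product_Area__c") ||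
                (pvGet other "Product_Feature__c" == pvGet item "Product_Feature__c") ||
                (pvGet other "RCA__c" == pvGet item "RCA__c")
              if is_related then (st2.1 ++ [other], st2.2.add (pvGet other "Id")) else st2)
          ([item], processed)
        (st.1 ++ [inner.1], inner.2))
    ([], PySem.Set.empty)).1

-- ===== PORT B =====
-- d.setdefault(k, []).append(x) is ported as d.modify k [] (· ++ [x]) (exact: same key
-- position, same resulting list).
def create_semantic_groups_alt (items : List (List (String × String))) : List (List (List (String × String))) :=
  let buckets :=
    (PySem.List.enumerate items 0).foldl
      (fun (s : PySem.Dict (Option String) (List (Int × List (String × String))) ×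
               PySem.Dict (Option String) (List (Int × List (String × String))) ×
               PySem.Dict (Option String) (List (Int × List (String × String)))) e =>
        (s.1.modify (pvGet e.2 "Product_Area__c") [] (· ++ [e]),
         s.2.1.modify (pvGet e.2 "Product_Feature__c") [] (· ++ [e]),
         s.2.2.modify (pvGet e.2 "RCA__c") [] (· ++ [e])))
      (PySem.Dict.empty, PySem.Dict.empty, PySem.Dict.empty)
  (items.foldl
    (fun (st : List (List (List (String × String))) × PySem.Set (Option String)) item =>
      if st.2.contains (pvGet item "Id") then st
      else
        let processed := st.2.add (pvGet item "Id")
        let cand := (buckets.1.getD (pvGet item "Product_Area__c") [] ++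
                     buckets.2.1.getD (pvGet item "Product_Feature__c") [] ++
                     buckets.2.2.getD (pvGet item "RCA__c") []).foldl
          (fun (d : PySem.Dict Int (List (String × String))) p =>
            if d.contains p.1 then d else d.insert p.1 p.2)
          PySem.Dict.empty
        let inner := (PySem.List.sorted cand.items (fun p => p.1)).foldl
          (fun (st2 : List (List (String × String)) × PySem.Set (Option String)) p =>
            if st2.2.contains (pvGet p.2 "Id") then st2
            else (st2.1 ++ [p.2], st2.2.add (pvGet p.2 "Id")))
          ([item], processed)
        (st.1 ++ [inner.1], inner.2))
    ([], PySem.Set.empty)).1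

-- ===== PRECONDITION & SPEC =====
def Spec_create_semantic_groups (items : List (List (String × String))) (out : List (List (List (String × String)))) : Prop := out = create_semantic_groups_alt items
instance (items : List (List (String × String))) (out : List (List (List (String × String)))) : Decidable (Spec_create_semantic_groups items out) := by unfold Spec_create_semantic_groups; infer_instance

-- ===== CLAIM (what is proved, stated in full; the proofs are below) =====
def Claim_equal_create_semantic_groups : Prop := ∀ (items : List (List (String × String))), Dom_create_semantic_groups items → Spec_create_semantic_groups items (create_semantic_groups items)

-- ===== LEMMAS AND PROOFS =====


-- helper definitions for the proofs (names match the corresponding pieces of the ports)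

def pvRel (item other : List (String × String)) : Bool :=
  (pvGet other "Product_Area__c" == pvGet item "Product_Area__c") ||
  (pvGet other "Product_Feature__c" == pvGet item "Product_Feature__c") ||
  (pvGet other "RCA__c" == pvGet item "RCA__c")

def pvStepC (st2 : List (List (String × String)) × PySem.Set (Option String))
    (other : List (String × String)) :
    List (List (String × String)) × PySem.Set (Option String) :=
  if st2.2.contains (pvGet other "Id") then st2
  else (st2.1 ++ [other], st2.2.add (pvGet other "Id"))

def pvBucket (attr : String) (items : List (List (String × String))) :
    PySem.Dict (Option String) (List (Int × List (String × String))) :=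
  (PySem.List.enumerate items 0).foldl
    (fun d e => d.modify (pvGet e.2 attr) [] (· ++ [e])) PySem.Dict.empty

def pvCandStep (d : PySem.Dict Int (List (String × String)))
    (p : Int × List (String × String)) : PySem.Dict Int (List (String × String)) :=
  if d.contains p.1 then d else d.insert p.1 p.2

def pvCand (items : List (List (String × String))) (item : List (String × String)) :
    PySem.Dict Int (List (String × String)) :=
  ((pvBucket "Product_Area__c" items).getD (pvGet item "Product_Area__c") [] ++
   (pvBucket "Product_Feature__c" items).getD (pvGet item "Product_Feature__c") [] ++
   (pvBucket "RCA__c" items).getD (pvGet item "RCA__c") []).foldl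
    pvCandStep PySem.Dict.empty

-- B's one-pass bucket build is the three independent bucket folds
lemma pvBuckets_eq (items : List (List (String × String))) :
    (PySem.List.enumerate items 0).foldl
      (fun (s : PySem.Dict (Option String) (List (Int × List (String × String))) ×
               PySem.Dict (Option String) (List (Int × List (String × String))) ×
               PySem.Dict (Option String) (List (Int × List (String × String)))) e =>
        (s.1.modify (pvGet e.2 "Product_Area__c") [] (· ++ [e]),
         s.2.1.modify (pvGet e.2 "Product_Feature__c") [] (· ++ [e]),
         s.2.2.modify (pvGet e.2 "RCA__c") [] (· ++ [e])))
      (PySem.Dict.empty, PySem.Dict.empty, PySem.Dict.empty)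
    = (pvBucket "Product_Area__c" items, pvBucket "Product_Feature__c" items,
       pvBucket "RCA__c" items) := by
  have h1 := PySem.List.foldl_prod_mk
    (f := fun (d : PySem.Dict (Option String) (List (Int × List (String × String)))) e =>
      d.modify (pvGet e.2 "Product_Area__c") [] (· ++ [e]))
    (g := fun (t : PySem.Dict (Option String) (List (Int × List (String × String))) ×
               PySem.Dict (Option String) (List (Int × List (String × String)))) e =>
      (t.1.modify (pvGet e.2 "Product_Feature__c") [] (· ++ [e]),
       t.2.modify (pvGet e.2 "RCA__c") [] (· ++ [e])))
    (PySem.List.enumerate items 0) PySem.Dict.empty (PySem.Dict.empty, PySem.Dict.empty)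
  have h2 := PySem.List.foldl_prod_mk
    (f := fun (d : PySem.Dict (Option String) (List (Int × List (String × String)))) e =>
      d.modify (pvGet e.2 "Product_Feature__c") [] (· ++ [e]))
    (g := fun (d : PySem.Dict (Option String) (List (Int × List (String × String)))) e =>
      d.modify (pvGet e.2 "RCA__c") [] (· ++ [e]))
    (PySem.List.enumerate items 0) PySem.Dict.empty PySem.Dict.empty
  exact h1.trans (by rw [h2]; rfl)

lemma pvBucket_getD (attr : String) (items : List (List (String × String)))
    (v : Option String) :
    (pvBucket attr items).getD v []
      = (PySem.List.enumerate items 0).filter (fun e => pvGet e.2 attr == v) := by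
  have h : pvBucket attr items
      = ((PySem.List.enumerate items 0).map (fun e => (pvGet e.2 attr, e))).foldl
          (fun d p => d.modify p.1 [] (· ++ [p.2])) PySem.Dict.empty :=
    (List.foldl_map (f := fun (e : Int × List (String × String)) => (pvGet e.2 attr, e))
      (g := fun d p => PySem.Dict.modify d p.1 [] (· ++ [p.2]))
      (l := PySem.List.enumerate items 0) (init := PySem.Dict.empty)).symm
  rw [h, PySem.Dict.getD_foldl_modify_append, PySem.Dict.getD_empty, List.filter_map]
  simp [Function.comp_def]

lemma pvCand_keys_nodup (C : List (Int × List (String × String)))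
    (d : PySem.Dict Int (List (String × String))) (h : d.keys.Nodup) :
    (C.foldl pvCandStep d).keys.Nodup := by
  induction C generalizing d with
  | nil => simpa using h
  | cons p L ih =>
    simp only [List.foldl_cons]
    unfold pvCandStep
    split
    · exact ih _ h
    · exact ih _ (PySem.Dict.nodup_keys_insert _ _ _ h)

lemma pvCand_mem_items (C : List (Int × List (String × String))) :
    ∀ (d : PySem.Dict Int (List (String × String))),
      (∀ p ∈ C, ∀ q ∈ C, p.1 = q.1 → p = q) →
      (∀ p ∈ C, ∀ q ∈ d.items, p.1 = q.1 → p = q) →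
      ∀ x, x ∈ (C.foldl pvCandStep d).items ↔ x ∈ d.items ∨ x ∈ C := by
  induction C with
  | nil => intro d _ _ x; simp
  | cons p L ih =>
    intro d hC hdC x
    simp only [List.foldl_cons]
    by_cases hc : d.contains p.1 = true
    · have hstep : pvCandStep d p = d := by simp [pvCandStep, hc]
      rw [hstep]
      have hpd : p ∈ d.items := by
        have hk : p.1 ∈ d.keys := (PySem.Dict.contains_iff_mem_keys d p.1).mp hc
        simp only [PySem.Dict.keys, List.mem_map] at hk
        obtain ⟨q, hq, hq1⟩ := hk
        have := hdC p (List.mem_cons_self) q hq hq1.symm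
        rwa [this]
      rw [ih d (fun a ha b hb => hC a (List.mem_cons_of_mem _ ha) b (List.mem_cons_of_mem _ hb))
            (fun a ha q hq => hdC a (List.mem_cons_of_mem _ ha) q hq)]
      have hxp : x = p → x ∈ d.items := fun h => h ▸ hpd
      simp only [List.mem_cons]
      tauto
    · have hstep : pvCandStep d p = d.insert p.1 p.2 := by simp [pvCandStep, hc]
      rw [hstep]
      have hdC' : ∀ a ∈ L, ∀ q ∈ (d.insert p.1 p.2).items, a.1 = q.1 → a = q := by
        intro a ha q hq h1
        rcases (PySem.Dict.mem_items_insert d p.1 p.2 q).mp hq with hq1 | ⟨hq2, _⟩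
        · have hqp : q = p := by rw [hq1]
          rw [hqp] at h1 ⊢
          exact hC a (List.mem_cons_of_mem _ ha) p List.mem_cons_self h1
        · exact hdC a (List.mem_cons_of_mem _ ha) q hq2 h1
      rw [ih (d.insert p.1 p.2)
            (fun a ha b hb => hC a (List.mem_cons_of_mem _ ha) b (List.mem_cons_of_mem _ hb))
            hdC']
      have hnotin : ∀ y ∈ d.items, (y : Int × List (String × String)).1 ≠ p.1 := by
        intro y hy hcontra
        have : p.1 ∈ d.keys := hcontra ▸ PySem.Dict.mem_keys_of_mem_items d hy
        exact hc ((PySem.Dict.contains_iff_mem_keys d p.1).mpr this)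
      rw [PySem.Dict.mem_items_insert]
      have h1 : x = (p.1, p.2) ↔ x = p := by
        constructor <;> intro h <;> simp [h]
      have h2 : x ∈ d.items → x.1 ≠ p.1 := hnotin x
      simp only [List.mem_cons]
      rw [h1]
      tauto

lemma pvEnum_inj (items : List (List (String × String))) :
    ∀ p ∈ PySem.List.enumerate items 0, ∀ q ∈ PySem.List.enumerate items 0,
      p.1 = q.1 → p = q := by
  intro p hp q hq h
  rw [PySem.List.mem_enumerate_iff] at hp hq
  obtain ⟨k, hk, rfl⟩ := hp
  obtain ⟨k', hk', rfl⟩ := hq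
  simp only [] at h
  have : k = k' := by omega
  subst this
  rfl

lemma pvEnum_nodup (items : List (List (String × String))) :
    (PySem.List.enumerate items 0).Nodup := by
  apply List.Pairwise.imp _ (PySem.List.pairwise_lt_enumerate items 0)
  intro a b hab hcontra
  rw [hcontra] at hab
  exact lt_irrefl _ hab

lemma pvSorted_cand (items : List (List (String × String)))
    (item : List (String × String)) :
    PySem.List.sorted (pvCand items item).items (fun p => p.1)
      = (PySem.List.enumerate items 0).filter (fun e => pvRel item e.2) := by
  have hCE : ∀ x, x ∈ ((pvBucket "Product_Area__c" items).getD (pvGet item "Product_Area__c") [] ++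
      (pvBucket "Product_Feature__c" items).getD (pvGet item "Product_Feature__c") [] ++
      (pvBucket "RCA__c" items).getD (pvGet item "RCA__c") [])
      ↔ x ∈ PySem.List.enumerate items 0 ∧ pvRel item x.2 = true := by
    intro x
    simp only [List.mem_append, pvBucket_getD, List.mem_filter, pvRel, Bool.or_eq_true]
    tauto
  have hC : ∀ p ∈ ((pvBucket "Product_Area__c" items).getD (pvGet item "Product_Area__c") [] ++
      (pvBucket "Product_Feature__c" items).getD (pvGet item "Product_Feature__c") [] ++
      (pvBucket "RCA__c" items).getD (pvGet item "RCA__c") []),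
      ∀ q ∈ ((pvBucket "Product_Area__c" items).getD (pvGet item "Product_Area__c") [] ++
      (pvBucket "Product_Feature__c" items).getD (pvGet item "Product_Feature__c") [] ++
      (pvBucket "RCA__c" items).getD (pvGet item "RCA__c") []), p.1 = q.1 → p = q := by
    intro p hp q hq h
    exact pvEnum_inj items p ((hCE p).mp hp).1 q ((hCE q).mp hq).1 h
  have hmem := pvCand_mem_items _ PySem.Dict.empty hC
    (by intro a _ q hq _; simp [PySem.Dict.empty] at hq)
  have hnodupitems : (pvCand items item).items.Nodup := by
    have h := pvCand_keys_nodup ((pvBucket "Product_Area__c" items).getD (pvGet item "Product_Area__c") [] ++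
      (pvBucket "Product_Feature__c" items).getD (pvGet item "Product_Feature__c") [] ++
      (pvBucket "RCA__c" items).getD (pvGet item "RCA__c") []) PySem.Dict.empty
      PySem.Dict.nodup_keys_empty
    simp only [PySem.Dict.keys] at h
    exact h.of_map
  have hfnodup : ((PySem.List.enumerate items 0).filter (fun e => pvRel item e.2)).Nodup :=
    (pvEnum_nodup items).filter _
  have hperm : ((PySem.List.enumerate items 0).filter (fun e => pvRel item e.2)).Perm
      (pvCand items item).items := by
    rw [List.perm_ext_iff_of_nodup hfnodup hnodupitems]
    intro x
    rw [List.mem_filter]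
    unfold pvCand
    rw [hmem x]
    rw [hCE x]
    simp [PySem.Dict.empty]
  have hpw : ((PySem.List.enumerate items 0).filter (fun e => pvRel item e.2)).Pairwise
      (fun a b => a.1 < b.1) := (PySem.List.pairwise_lt_enumerate items 0).filter _
  exact PySem.List.sorted_eq_of_perm_of_pairwise_lt _ _ _ hperm hpw

-- both inner loops compute the same fold over the related items, in index order
lemma pvInner (items : List (List (String × String))) (item : List (String × String))
    (init : List (List (String × String)) × PySem.Set (Option String)) :
    items.foldl
      (fun (st2 : List (List (String × String)) × PySem.Set (Option String)) other =>
        if st2.2.contains (pvGet other "Id") then st2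
        else
          let is_related :=
            (pvGet other "Product_Area__c" == pvGet item "Product_Area__c") ||
            (pvGet other "Product_Feature__c" == pvGet item "Product_Feature__c") ||
            (pvGet other "RCA__c" == pvGet item "RCA__c")
          if is_related then (st2.1 ++ [other], st2.2.add (pvGet other "Id")) else st2)
      init
    = (PySem.List.sorted (pvCand items item).items (fun p => p.1)).foldl
        (fun (st2 : List (List (String × String)) × PySem.Set (Option String)) p =>
          if st2.2.contains (pvGet p.2 "Id") then st2
          else (st2.1 ++ [p.2], st2.2.add (pvGet p.2 "Id")))
        init := by
  rw [pvSorted_cand]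
  have hA : items.foldl
      (fun (st2 : List (List (String × String)) × PySem.Set (Option String)) other =>
        if st2.2.contains (pvGet other "Id") then st2
        else
          let is_related :=
            (pvGet other "Product_Area__c" == pvGet item "Product_Area__c") ||
            (pvGet other "Product_Feature__c" == pvGet item "Product_Feature__c") ||
            (pvGet other "RCA__c" == pvGet item "RCA__c")
          if is_related then (st2.1 ++ [other], st2.2.add (pvGet other "Id")) else st2)
      init
      = (items.filter (fun other => pvRel item other)).foldl pvStepC init := by
    rw [PySem.List.foldl_congr_mem items _
      (fun st2 other => if pvRel item other then pvStepC st2 other else st2) init ?_]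
    · exact PySem.List.foldl_if_eq_foldl_filter _ _ _ _
    intro acc x _
    simp only [show ((pvGet x "Product_Area__c" == pvGet item "Product_Area__c") ||
        (pvGet x "Product_Feature__c" == pvGet item "Product_Feature__c") ||
        (pvGet x "RCA__c" == pvGet item "RCA__c")) = pvRel item x from rfl]
    by_cases hr : pvRel item x = true
    · simp [pvStepC, hr]
    · simp [hr]
  have hmapsnd : ((PySem.List.enumerate items 0).filter (fun e => pvRel item e.2)).map
      (fun e => e.2) = items.filter (fun other => pvRel item other) := by
    have h := (@List.filter_map (Int × List (String × String)) (List (String × String))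
      (fun e => e.2) (fun other => pvRel item other) (PySem.List.enumerate items 0)).symm
    exact h.trans (by rw [PySem.List.map_snd_enumerate])
  have hB : ((PySem.List.enumerate items 0).filter (fun e => pvRel item e.2)).foldl
      (fun (st2 : List (List (String × String)) × PySem.Set (Option String)) p =>
        if st2.2.contains (pvGet p.2 "Id") then st2
        else (st2.1 ++ [p.2], st2.2.add (pvGet p.2 "Id")))
      init
      = (items.filter (fun other => pvRel item other)).foldl pvStepC init := by
    rw [← hmapsnd, List.foldl_map]
    rfl
  rw [hA, hB]

lemma pvAlt_eq (items : List (List (String × String))) :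
    create_semantic_groups_alt items
    = (items.foldl
        (fun (st : List (List (List (String × String))) × PySem.Set (Option String)) item =>
          if st.2.contains (pvGet item "Id") then st
          else
            let processed := st.2.add (pvGet item "Id")
            let inner := (PySem.List.sorted (pvCand items item).items (fun p => p.1)).foldl
              (fun (st2 : List (List (String × String)) × PySem.Set (Option String)) p =>
                if st2.2.contains (pvGet p.2 "Id") then st2
                else (st2.1 ++ [p.2], st2.2.add (pvGet p.2 "Id")))
              ([item], processed)
            (st.1 ++ [inner.1], inner.2))
        ([], PySem.Set.empty)).1 := by
  unfold create_semantic_groups_alt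
  rw [pvBuckets_eq]
  rfl

-- ===== VERDICT (by name: the statement is the Claim_ definition above) =====
theorem create_semantic_groups_spec : Claim_equal_create_semantic_groups := by
  intro items _
  show create_semantic_groups items = create_semantic_groups_alt items
  rw [pvAlt_eq]
  unfold create_semantic_groups
  refine congrArg Prod.fst ?_
  refine PySem.List.foldl_congr_mem _ _ _ _ ?_
  intro acc item _
  by_cases hc : acc.2.contains (pvGet item "Id") = true
  · simp only [hc, if_true]
  · simp only [hc]
    rw [pvInner items item ([item], acc.2.add (pvGet item "Id"))]
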